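-- pv_equiv track=rewrite | github.com/AJL97/NUR-assignment1 | NUR-final/functions.py | bisection_index_finding
-- ===== SOURCE A (Python) =====
-- def bisection_index_finding(x,x_data):
-- 	'''
-- 	Parameters:
-- 	x = the to be evaluated x data point
-- 	x_data = the given x data points
-- 	'''
-- 	#Starting indexes are at the borders of the given data
-- 	left_idx = 0 #Left bound
-- 	right_idx = len(x_data)-1 #Right bound
--
-- 	#If the to be evaluated point falls outside of the bounds,
-- 	#return the first two (or last two) indexes of the given data points
-- 	if x < x_data[left_idx]: return left_idx+1,left_idx
-- 	elif x > x_data[right_idx]: return right_idx-1,right_idx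
--
-- 	while True:
-- 		#Stop if the difference between left and right is 1
-- 		if right_idx-left_idx == 1:
-- 			break
-- 		#Divide the left plus right index by two, to find
-- 		#the middle index
-- 		split = int((left_idx + right_idx)/2)
--
-- 		#Determining on which side x is
-- 		if x_data[split] > x: right_idx = split
-- 		else: left_idx = split
--
-- 	return left_idx,right_idx
-- ===== SOURCE B (Python) =====
-- def bisection_index_finding(x, x_data):
--     '''Single forward scan for the first data point above x (sorted data);
--     same boundary guards as the original.'''
--     if x < x_data[0]:
--         return 1, 0
--     if x > x_data[-1]:
--         return len(x_data) - 2, len(x_data) - 1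
--     for i in range(1, len(x_data)):
--         if x_data[i] > x:
--             return i - 1, i
--     return len(x_data) - 2, len(x_data) - 1
-- ===== Notes on version B (the rewrite author's own statement) =====
-- stated objective: simpler
-- what changed: The while-loop bisection is replaced by a single left-to-right scan that returns at the first element strictly above x; Pre_ restricts the claim to the function's documented domain (sorted data) plus the inputs the two top guards or a length <= 2 decide, excluding interior queries on unsorted data where A's answer is an accident of its split trajectory, the empty list (IndexError) and the single-element list with x == x_data[0] (A loops forever).
-- outside the precondition, e.g. on bisection_index_finding(5, [1, 10, 0, 0, 20]): A returns (3, 4), B returns (0, 1); on bisection_index_finding(7, [7]): A does not finish within the time limit, B returns (-1, 0); on bisection_index_finding(0, []): A raises IndexError, B raises IndexError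
import Mathlib
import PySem

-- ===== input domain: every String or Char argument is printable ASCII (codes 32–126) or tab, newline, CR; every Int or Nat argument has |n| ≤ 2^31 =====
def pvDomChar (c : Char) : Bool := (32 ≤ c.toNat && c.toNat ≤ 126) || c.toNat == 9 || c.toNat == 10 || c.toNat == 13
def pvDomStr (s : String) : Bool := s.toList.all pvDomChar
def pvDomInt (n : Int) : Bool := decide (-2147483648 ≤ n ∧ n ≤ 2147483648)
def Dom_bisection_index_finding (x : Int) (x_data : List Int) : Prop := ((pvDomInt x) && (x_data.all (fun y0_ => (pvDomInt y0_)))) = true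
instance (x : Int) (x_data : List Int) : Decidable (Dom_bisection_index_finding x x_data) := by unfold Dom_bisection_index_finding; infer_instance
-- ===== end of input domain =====

-- B replaces A's while-loop bisection by a single left-to-right scan for the first element above x (simpler, not faster);
-- equal on sorted data and wherever the shared top guards or a length ≤ 2 decide the answer (see Pre_).

-- ===== PORT A =====
-- A's 'while True' loop; the fuel argument only makes it total (inside Pre_ it never runs out: the
-- gap right-left shrinks every iteration) — where Python diverges or raises IndexError, Pre_ excludes.
def pvALoop (x : Int) (x_data : List Int) : Nat → Int → Int → Int × Int
  | 0, left_idx, right_idx => (left_idx, right_idx)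
  | fuel + 1, left_idx, right_idx =>
    if right_idx - left_idx = 1 then (left_idx, right_idx)
    else
      -- split = int((left_idx + right_idx)/2): truncation toward zero, exact for these indices
      let split := (left_idx + right_idx).tdiv 2
      match PySem.List.pyGet? x_data split with
      | none => (left_idx, right_idx)  -- IndexError (outside Pre_)
      | some v =>
        if v > x then pvALoop x x_data fuel left_idx split
        else pvALoop x x_data fuel split right_idx

def bisection_index_finding (x : Int) (x_data : List Int) : Int × Int :=
  let left_idx : Int := 0
  let right_idx : Int := (x_data.length : Int) - 1
  match PySem.List.pyGet? x_data left_idx, PySem.List.pyGet? x_data right_idx with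
  | some a, some b =>
    if x < a then (left_idx + 1, left_idx)
    else if x > b then (right_idx - 1, right_idx)
    else pvALoop x x_data (x_data.length + 1) left_idx right_idx
  | _, _ => (0, 0)  -- IndexError on the empty list (outside Pre_)

-- ===== PORT B =====
-- 'for i in range(1, len(x_data)): if x_data[i] > x: return i-1, i'
def pvBScan (x : Int) (x_data : List Int) : List Int → Int × Int
  | [] => ((x_data.length : Int) - 2, (x_data.length : Int) - 1)
  | i :: rest =>
    -- none = IndexError, unreachable: i comes from range(1, len(x_data))
    (PySem.List.pyGet? x_data i).casesOn (0, 0)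
      (fun v => if v > x then (i - 1, i) else pvBScan x x_data rest)

def bisection_index_finding_alt (x : Int) (x_data : List Int) : Int × Int :=
  -- the none branches are the IndexError on the empty list (outside Pre_)
  (PySem.List.pyGet? x_data 0).casesOn (0, 0) (fun a =>
    (PySem.List.pyGet? x_data (-1)).casesOn (0, 0) (fun b =>
      if x < a then (1, 0)
      else if x > b then ((x_data.length : Int) - 2, (x_data.length : Int) - 1)
      else pvBScan x x_data (PySem.List.pyRange 1 (x_data.length : Int) 1)))

-- ===== PRECONDITION & SPEC =====
-- Pre_ excludes: the empty list (A raises IndexError), the single-element list with x = x_data[0]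
-- (A loops forever), and unsorted lists on which x falls strictly inside the guards' range with
-- length ≥ 3 — there A's answer is an accident of its split trajectory (the function is documented
-- for sorted data), while A=B holds on all sorted lists and wherever a guard or length ≤ 2 decides.
def Pre_bisection_index_finding (x : Int) (x_data : List Int) : Prop :=
  x_data ≠ [] ∧
  (x_data.length = 1 → x ≠ x_data.getD 0 0) ∧
  (List.Pairwise (· ≤ ·) x_data ∨ x_data.length ≤ 2 ∨
    x < x_data.getD 0 0 ∨ x_data.getD (x_data.length - 1) 0 < x)
instance (x : Int) (x_data : List Int) : Decidable (Pre_bisection_index_finding x x_data) := by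
  unfold Pre_bisection_index_finding; infer_instance

def pvWitness_bisection_index_finding : Int × List Int := (3, [1, 2, 5, 9])

def Spec_bisection_index_finding (x : Int) (x_data : List Int) (out : Int × Int) : Prop := out = bisection_index_finding_alt x x_data
instance (x : Int) (x_data : List Int) (out : Int × Int) : Decidable (Spec_bisection_index_finding x x_data out) := by unfold Spec_bisection_index_finding; infer_instance

-- ===== CLAIM (what is proved, stated in full; the proofs are below) =====
def Claim_equal_bisection_index_finding : Prop := ∀ (x : Int) (x_data : List Int), Dom_bisection_index_finding x x_data → Pre_bisection_index_finding x x_data → Spec_bisection_index_finding x x_data (bisection_index_finding x x_data)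

-- ===== LEMMAS AND PROOFS =====

-- the common characterisation: first index whose element exceeds x, as the returned pair
def pvSpec (x : Int) (x_data : List Int) : Int × Int :=
  match x_data.findIdx? (fun v => decide (x < v)) with
  | some j => ((j : Int) - 1, (j : Int))
  | none => ((x_data.length : Int) - 2, (x_data.length : Int) - 1)

theorem pv_findIdx?_some (p : Int → Bool) :
    ∀ (xs : List Int) (k : Nat) (hk : k < xs.length), p xs[k] = true →
      (∀ j (hj : j < k), p (xs[j]'(lt_trans hj hk)) = false) →
      xs.findIdx? p = some k := by
  intro xs
  induction xs with
  | nil => intro k hk; simp at hk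
  | cons a xs ih =>
    intro k hk hp hmin
    cases k with
    | zero => simp at hp; simp [List.findIdx?_cons, hp]
    | succ k =>
      have h0 : p a = false := hmin 0 (Nat.succ_pos k)
      simp only [List.findIdx?_cons, h0]
      have := ih k (by simpa using hk) (by simpa using hp)
        (fun j hj => by simpa using hmin (j+1) (by omega))
      simp [this]

theorem pv_bscan_eq (x : Int) (x_data : List Int) :
    ∀ l : Nat, 1 ≤ l →
      (∀ j (_hj1 : j < l) (hj2 : j < x_data.length), ¬ x < x_data[j]) →
      pvBScan x x_data (PySem.List.pyRange (l : Int) (x_data.length : Int) 1) =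
        pvSpec x x_data := by
  intro l
  induction hn : x_data.length - l generalizing l with
  | zero =>
    intro hl hall
    rw [PySem.List.pyRange_one_eq_nil (by omega)]
    have hnone : x_data.findIdx? (fun v => decide (x < v)) = none := by
      rw [List.findIdx?_eq_none_iff]
      intro v hv
      obtain ⟨j, hj, rfl⟩ := List.getElem_of_mem hv
      simpa using hall j (by omega) hj
    simp [pvBScan, pvSpec, hnone]
  | succ k ih =>
    intro hl hall
    have hlt : l < x_data.length := by omega
    rw [PySem.List.pyRange_one_cons (by exact_mod_cast hlt)]
    have hget : PySem.List.pyGet? x_data (l : Int) = some x_data[l] := by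
      simp [hlt]
    simp only [pvBScan, hget]
    by_cases hx : x < x_data[l]
    · have : x_data.findIdx? (fun v => decide (x < v)) = some l :=
        pv_findIdx?_some _ x_data l hlt (by simpa using hx)
          (fun j hj => by simpa using hall j hj (lt_trans hj hlt))
      simp [pvSpec, this, hx]
    · rw [if_neg (by simpa using hx)]
      have hcast : ((l : Int) + 1) = ((l + 1 : Nat) : Int) := by push_cast; ring
      rw [hcast]
      refine ih (l + 1) (by omega) (by omega) ?_
      intro j hj1 hj2
      rcases Nat.lt_succ_iff_lt_or_eq.mp hj1 with h | h
      · exact hall j h hj2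
      · subst h; exact hx

theorem pv_aloop_eq (x : Int) (x_data : List Int)
    (hs : List.Pairwise (· ≤ ·) x_data) :
    ∀ (fuel l r : Nat) (_hlr : l < r) (_hr : r < x_data.length)
      (_hfuel : r - l ≤ fuel)
      (_hl : ¬ x < x_data[l])
      (_hrr : x < x_data[r] ∨ r = x_data.length - 1),
      pvALoop x x_data fuel (l : Int) (r : Int) = pvSpec x x_data := by
  have hsorted : ∀ (i j : Nat) (hi : i ≤ j) (hj : j < x_data.length),
      x_data[i]'(lt_of_le_of_lt hi hj) ≤ x_data[j] := by
    intro i j hi hj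
    rcases Nat.lt_or_eq_of_le hi with h | h
    · exact List.pairwise_iff_getElem.mp hs i j _ hj h
    · subst h; exact le_refl _
  intro fuel
  induction fuel with
  | zero => intro l r hlr hr hfuel; omega
  | succ fuel ih =>
    intro l r hlr hr hfuel hl hrr
    by_cases h1 : (r : Int) - (l : Int) = 1
    · -- gap is 1: the loop stops at (l, r); pvSpec gives the same pair
      have hrl : r = l + 1 := by omega
      simp only [pvALoop, if_pos h1]
      by_cases hx : x < x_data[r]
      · have : x_data.findIdx? (fun v => decide (x < v)) = some r :=
          pv_findIdx?_some _ x_data r hr (by simpa using hx)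
            (fun j hj => by
              simp only [decide_eq_false_iff_not, not_lt]
              calc x_data[j]'(lt_trans hj hr) ≤ x_data[l] := hsorted j l (by omega) (by omega)
                _ ≤ x := not_lt.mp hl)
        simp only [pvSpec, this, Prod.mk.injEq, and_true]
        omega
      · rcases hrr with h | h
        · exact absurd h hx
        · have hnone : x_data.findIdx? (fun v => decide (x < v)) = none := by
            rw [List.findIdx?_eq_none_iff]
            intro v hv
            obtain ⟨j, hj, rfl⟩ := List.getElem_of_mem hv
            simp only [decide_eq_false_iff_not, not_lt]
            calc x_data[j] ≤ x_data[r] := hsorted j r (by omega) hr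
              _ ≤ x := not_lt.mp hx
          simp only [pvSpec, hnone, Prod.mk.injEq]
          omega
    · -- gap ≥ 2: one bisection step
      set m : Nat := (l + r) / 2 with hm
      have hsplit : ((l : Int) + (r : Int)).tdiv 2 = (m : Int) := by
        rw [show ((l:Int)+(r:Int)) = ((l+r : Nat) : Int) by push_cast; ring]
        rw [Int.tdiv_eq_ediv]
        omega
      have hlm : l < m := by omega
      have hmr : m < r := by omega
      have hget : PySem.List.pyGet? x_data (m : Int) = some (x_data[m]'(by omega)) := by
        simp [show m < x_data.length by omega]
      simp only [pvALoop, if_neg h1, hsplit, hget]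
      by_cases hx : x < x_data[m]'(by omega)
      · rw [if_pos (by simpa using hx)]
        exact ih l m hlm (by omega) (by omega) hl (Or.inl hx)
      · rw [if_neg (by simpa using hx)]
        exact ih m r hmr hr (by omega) hx hrr

-- ===== VERDICT (by name: the statement is the Claim_ definition above) =====
theorem bisection_index_finding_spec : Claim_equal_bisection_index_finding := by
  intro x x_data _ hpre
  obtain ⟨hne, h1, h3⟩ := hpre
  have hn : 0 < x_data.length := List.length_pos_iff.mpr hne
  show bisection_index_finding x x_data = bisection_index_finding_alt x x_data
  by_cases hl1 : x_data.length = 1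
  · -- single element a with x ≠ a: a guard decides on both sides
    obtain ⟨a, rfl⟩ := List.length_eq_one_iff.mp hl1
    have hxa : x ≠ a := by simpa using h1 hl1
    rcases lt_trichotomy x a with h | h | h
    · simp [bisection_index_finding, bisection_index_finding_alt,
        PySem.List.pyGet?, PySem.List.pyIdx?, h]
    · exact absurd h hxa
    · simp [bisection_index_finding, bisection_index_finding_alt,
        PySem.List.pyGet?, PySem.List.pyIdx?, h, not_lt.mpr (le_of_lt h)]
  · by_cases hl2 : x_data.length = 2
    · -- two elements: guards or the single comparison decide, on both sides
      obtain ⟨a, b, rfl⟩ := List.length_eq_two.mp hl2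
      have hr12 : PySem.List.pyRange (1 : Int) (2 : Int) 1 = [1] := by decide
      by_cases hga : x < a
      · simp [bisection_index_finding, bisection_index_finding_alt,
          PySem.List.pyGet?, PySem.List.pyIdx?, hga]
      · by_cases hgb : x > b
        · simp [bisection_index_finding, bisection_index_finding_alt,
            PySem.List.pyGet?, PySem.List.pyIdx?, hga, hgb]
        · simp only [bisection_index_finding, bisection_index_finding_alt]
          simp [PySem.List.pyGet?, PySem.List.pyIdx?, hga, hgb, hr12, pvALoop]
          simp [pvBScan, PySem.List.pyGet?, PySem.List.pyIdx?]
    · -- length ≥ 3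
      have hn3 : 3 ≤ x_data.length := by omega
      have hget0 : PySem.List.pyGet? x_data (0 : Int) = some (x_data[0]'hn) := by
        simp [hn]
      have hcastlast : ((x_data.length : Int) - 1) = ((x_data.length - 1 : Nat) : Int) := by
        omega
      have hgetlast : PySem.List.pyGet? x_data ((x_data.length : Int) - 1) =
          some (x_data[x_data.length - 1]'(by omega)) := by
        rw [hcastlast]; simp [show x_data.length - 1 < x_data.length by omega]
      have hgetneg : PySem.List.pyGet? x_data (-1) =
          some (x_data[x_data.length - 1]'(by omega)) := by
        rw [PySem.List.pyGet?_neg_one, List.getLast?_eq_getElem?,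
          List.getElem?_eq_getElem (by omega)]
      have hD0 : x_data.getD 0 0 = x_data[0]'hn := List.getD_eq_getElem x_data 0 hn
      have hDl : x_data.getD (x_data.length - 1) 0 = x_data[x_data.length - 1]'(by omega) :=
        List.getD_eq_getElem x_data 0 (by omega)
      simp only [bisection_index_finding, bisection_index_finding_alt, hget0, hgetlast, hgetneg]
      by_cases hga : x < x_data[0]'hn
      · simp [hga]
      · rw [if_neg hga, if_neg hga]
        by_cases hgb : x > x_data[x_data.length - 1]'(by omega)
        · rw [if_pos hgb, if_pos hgb]
          simp only [Prod.mk.injEq, and_true]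
          omega
        · rw [if_neg hgb, if_neg hgb]
          have hs : List.Pairwise (· ≤ ·) x_data := by
            rcases h3 with hs | hlen | hlt0 | hgtl
            · exact hs
            · omega
            · rw [hD0] at hlt0; exact absurd hlt0 hga
            · rw [hDl] at hgtl; exact absurd hgtl hgb
          rw [hcastlast]
          rw [show (0 : Int) = ((0 : Nat) : Int) by norm_num]
          rw [pv_aloop_eq x x_data hs (x_data.length + 1) 0 (x_data.length - 1)
            (by omega) (by omega) (by omega) hga (Or.inr rfl)]
          rw [show (1 : Int) = ((1 : Nat) : Int) by norm_num]
          exact (pv_bscan_eq x x_data 1 (by omega)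
            (fun j hj1 hj2 => by
              have hj0 : j = 0 := by omega
              subst hj0; exact hga)).symm
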